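-- pv_equiv track=rewrite | github.com/DieAllergie/TMS | task_8_1.py | fact2
-- ===== SOURCE A (Python) =====
-- def fact2(n: int) -> int:
--     itog = 1
--     if n % 2 == 0:
--         while n >= 2:
--             itog = itog * n
--             n = n - 2
--     else:
--         while n >= 1:
--             itog = itog * n
--             n = n - 2
--     return itog
-- ===== SOURCE B (Python) =====
-- import math
--
-- def fact2(n: int) -> int:
--     # Double factorial via ordinary factorials: (2m)!! = 2^m * m!,
--     # (2m+1)!! = (2m+1)! // (2^m * m!).  Empty product is 1 for n < 2.
--     if n < 2:
--         return 1
--     m = n // 2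
--     half = (1 << m) * math.factorial(m)
--     if n % 2 == 0:
--         return half
--     return math.factorial(n) // half
-- ===== Notes on version B (the rewrite author's own statement) =====
-- stated objective: alternative
-- what changed: Replaces the descending step-2 product loop by a closed form from ordinary factorials: (2m)!! = 2^m * m! and (2m+1)!! = (2m+1)!/(2^m * m!), with the empty product 1 for n < 2.
import Mathlib
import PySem

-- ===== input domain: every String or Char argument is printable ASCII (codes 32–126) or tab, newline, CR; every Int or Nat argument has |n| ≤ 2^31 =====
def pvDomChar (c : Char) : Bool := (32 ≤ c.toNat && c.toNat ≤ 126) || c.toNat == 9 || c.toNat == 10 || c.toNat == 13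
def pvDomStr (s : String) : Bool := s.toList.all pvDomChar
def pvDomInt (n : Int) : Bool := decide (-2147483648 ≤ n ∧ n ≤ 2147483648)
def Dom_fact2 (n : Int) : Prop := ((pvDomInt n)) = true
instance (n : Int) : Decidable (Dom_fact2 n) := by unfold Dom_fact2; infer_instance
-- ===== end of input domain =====

-- B replaces the descending step-2 product loop by a closed form from ordinary
-- factorials ((2m)!! = 2^m·m!, (2m+1)!! = (2m+1)!/(2^m·m!)); same results, alternative algorithm.

-- ===== PORT A =====
-- while n >= 2: itog *= n; n -= 2   (even branch)
def fact2EvenLoop (n itog : Int) : Int :=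
  if 2 ≤ n then fact2EvenLoop (n - 2) (itog * n) else itog
termination_by n.toNat
decreasing_by omega

-- while n >= 1: itog *= n; n -= 2   (odd branch)
def fact2OddLoop (n itog : Int) : Int :=
  if 1 ≤ n then fact2OddLoop (n - 2) (itog * n) else itog
termination_by n.toNat
decreasing_by omega

def fact2 (n : Int) : Int :=
  if PySem.Int.mod n 2 == 0 then fact2EvenLoop n 1 else fact2OddLoop n 1

-- ===== PORT B =====
-- 1 << m and math.factorial(m) ported via 2 ^ m.toNat and Nat.factorial m.toNat
-- (exact here since m ≥ 0 on the branch that uses them).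
def fact2_alt (n : Int) : Int :=
  if n < 2 then 1
  else
    let m := PySem.Int.floordiv n 2
    let half := (2 : Int) ^ m.toNat * (Nat.factorial m.toNat : Int)
    if PySem.Int.mod n 2 == 0 then half
    else PySem.Int.floordiv (Nat.factorial n.toNat : Int) half

-- ===== PRECONDITION & SPEC =====
def Spec_fact2 (n : Int) (out : Int) : Prop := out = fact2_alt n
instance (n : Int) (out : Int) : Decidable (Spec_fact2 n out) := by unfold Spec_fact2; infer_instance

-- ===== CLAIM (what is proved, stated in full; the proofs are below) =====
def Claim_equal_fact2 : Prop := ∀ (n : Int), Dom_fact2 n → Spec_fact2 n (fact2 n)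

-- ===== LEMMAS AND PROOFS =====

theorem evenLoop_spec (k : Nat) : ∀ acc : Int,
    fact2EvenLoop (2 * (k : Int)) acc = acc * (2 ^ k * (Nat.factorial k : Int)) := by
  induction k with
  | zero => intro acc; rw [fact2EvenLoop]; simp [Nat.factorial]
  | succ k ih =>
    intro acc
    rw [fact2EvenLoop, if_pos (show (2:Int) ≤ 2 * ((k+1 : Nat) : Int) by push_cast; omega)]
    have h : (2 * ((k+1 : Nat) : Int) - 2) = 2 * (k : Int) := by push_cast; ring
    rw [h, ih, Nat.factorial_succ]
    push_cast
    ring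

theorem oddLoop_spec (k : Nat) : ∀ acc : Int,
    fact2OddLoop (2 * (k : Int) + 1) acc * (2 ^ k * (Nat.factorial k : Int))
      = acc * (Nat.factorial (2 * k + 1) : Int) := by
  induction k with
  | zero =>
    intro acc
    rw [fact2OddLoop, if_pos (show (1:Int) ≤ 2 * ((0:Nat):Int) + 1 by norm_num)]
    rw [fact2OddLoop]
    norm_num [Nat.factorial]
  | succ k ih =>
    intro acc
    rw [fact2OddLoop, if_pos (show (1:Int) ≤ 2 * ((k+1 : Nat):Int) + 1 by push_cast; omega)]
    have h : (2 * ((k+1 : Nat):Int) + 1 - 2) = 2 * (k : Int) + 1 := by push_cast; ring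
    rw [h]
    have hfac : (Nat.factorial (2 * (k+1) + 1) : Int)
        = (2 * (k:Int) + 3) * (2 * (k:Int) + 2) * (Nat.factorial (2 * k + 1) : Int) := by
      have : 2 * (k+1) + 1 = (2 * k + 2) + 1 := by ring
      rw [this, Nat.factorial_succ, Nat.factorial_succ]
      push_cast; ring
    calc fact2OddLoop (2 * (k:Int) + 1) (acc * (2 * ((k+1:Nat):Int) + 1)) * (2 ^ (k+1) * (Nat.factorial (k+1) : Int))
        = (fact2OddLoop (2 * (k:Int) + 1) (acc * (2 * ((k+1:Nat):Int) + 1)) * (2 ^ k * (Nat.factorial k : Int))) * (2 * ((k:Int) + 1)) := by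
          rw [Nat.factorial_succ]; push_cast; ring
      _ = (acc * (2 * ((k+1:Nat):Int) + 1)) * (Nat.factorial (2 * k + 1) : Int) * (2 * ((k:Int) + 1)) := by rw [ih]
      _ = acc * (Nat.factorial (2 * (k+1) + 1) : Int) := by rw [hfac]; push_cast; ring

theorem evenLoop_small (n : Int) (h : n < 2) : fact2EvenLoop n 1 = 1 := by
  rw [fact2EvenLoop, if_neg (by omega)]

theorem oddLoop_small (n : Int) (h : n < 2) : fact2OddLoop n 1 = 1 := by
  rw [fact2OddLoop]
  split
  · have hn : n = 1 := by omega
    subst hn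
    rw [fact2OddLoop, if_neg (by omega)]
    norm_num
  · rfl

-- ===== VERDICT (by name: the statement is the Claim_ definition above) =====
theorem fact2_spec : Claim_equal_fact2 := by
  intro n _
  unfold Spec_fact2
  by_cases h2 : n < 2
  · rw [fact2_alt, if_pos h2, fact2]
    split
    · exact evenLoop_small n h2
    · exact oddLoop_small n h2
  · rw [not_lt] at h2
    -- n ≥ 2
    rcases Int.even_or_odd n with ⟨m, hm⟩ | ⟨m, hm⟩
    · -- n = 2m, m ≥ 1
      have hmod : PySem.Int.mod n 2 = 0 := by
        rw [PySem.Int.mod_eq_emod_of_pos (by omega)]; omega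
      have hdiv : PySem.Int.floordiv n 2 = m := by
        rw [PySem.Int.floordiv_eq_ediv_of_pos (by omega)]; omega
      have hcond : (PySem.Int.mod n 2 == 0) = true := by rw [hmod]; decide
      rw [fact2, if_pos hcond, fact2_alt, if_neg (by omega)]
      simp only [hdiv, hcond, if_true]
      have hspec := evenLoop_spec m.toNat 1
      rw [one_mul] at hspec
      rw [show n = 2 * ((m.toNat : Nat) : Int) by omega]
      exact hspec
    · -- n = 2m + 1, m ≥ 1
      have hmod : PySem.Int.mod n 2 = 1 := by
        rw [PySem.Int.mod_eq_emod_of_pos (by omega)]; omega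
      have hdiv : PySem.Int.floordiv n 2 = m := by
        rw [PySem.Int.floordiv_eq_ediv_of_pos (by omega)]; omega
      have hcond : (PySem.Int.mod n 2 == 0) = false := by rw [hmod]; decide
      have hnnat : n.toNat = 2 * m.toNat + 1 := by omega
      rw [fact2, if_neg (by rw [hcond]; decide), fact2_alt, if_neg (by omega)]
      simp only [hdiv, hcond, if_false, Bool.false_eq_true]
      have hodd := oddLoop_spec m.toNat 1
      rw [one_mul] at hodd
      have hpos : (0:Int) < 2 ^ m.toNat * (Nat.factorial m.toNat : Int) := by
        positivity
      rw [show n = 2 * ((m.toNat : Nat) : Int) + 1 by omega]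
      rw [show (2 * ((m.toNat : Nat) : Int) + 1).toNat = 2 * m.toNat + 1 by omega]
      rw [← hodd, PySem.Int.floordiv_eq_ediv_of_pos hpos,
        Int.mul_ediv_cancel _ (ne_of_gt hpos)]
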